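-- pv_equiv track=rewrite | github.com/XT-Lee/library_for_pin_depin_node | persistence_algorithm.py | persist_alg
-- ===== SOURCE A (Python) =====
-- def persist_alg ( edge_list , dP, ascending = True ) :
--     # Sort positional indices of edges in edge_list in ascending or descending order of absolute
--     # value of pressure difference .
--     NE = len( edge_list )
--     edge_to_pressure= lambda edgei : dP[ edgei ]
--     sorted_edges = sorted ( range ( NE ) , key = edge_to_pressure , reverse =( not ascending ) )
--
--     # Map of sectors ( labeled by birth edges ) to sets of vertices seen so far in filtration .
--     sectors_to_verts = dict()
--     # Map of vertices seen so far in filtration to sectors .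
--     verts_to_sectors = dict()
--
--     # Sector skeleton .
--     skeleton = set()
--
--     # Birth - death pairs of pressure differences .
--     bd_pairs = []
--     # Birth - death pairs of edges .
--     bd_edges = []
--     # Persistence values of each birth - death pair .
--     tau = []
--
--     # Iterate through each edge in sorted order .
--     for i , ei in enumerate ( sorted_edges ) :
--         ( vi , vj ) = edge_list [ ei ]
--         # If both vertices have already appeared in filtration and are already in the same sector ,
--         # then skip .
--         if ( vi in verts_to_sectors and vj in verts_to_sectors
--             and verts_to_sectors [ vi ] == verts_to_sectors [ vj ]) :
--             continue
--         # Add edge to sector skeleton .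
--         skeleton.add ( ei )
--
--         # Case i ) : Edge creates new connected component .
--         # Neither vertex has already appeared in filtration .
--         # Create new sector and label sector with current edge as birth edge .
--         if vi not in verts_to_sectors and vj not in verts_to_sectors :
--             sectors_to_verts[ ei ] = { vi , vj }
--             verts_to_sectors[ vi ] = ei
--             verts_to_sectors[ vj ] = ei
--
--         # Case ii ) : Edge merges two connected components .
--         # Both vertices have already appeared in filtration and are in different sectors .
--         # Record current edge as death edge , record persistence pair , and join sectors .
--         elif ( vi in verts_to_sectors and vj in verts_to_sectors
--             and verts_to_sectors [ vi ] != verts_to_sectors [ vj ]) :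
--
--             # Record current edge as death edge .
--             death_edge = ei
--             death_dP= dP[ ei ]
--
--             si = verts_to_sectors[ vi ]
--             sj = verts_to_sectors[ vj ]
--
--             # Ensure that sector si is the more recent of the two sectors in the filtration .
--             if ( ascending and dP[ si ] < dP[ sj ]) or ( not ascending and dP[ si ] > dP[ sj ]) :
--                 si , sj = sj , si
--
--             # Record the label of this " younger " sector is the birth edge .
--             # This is refered to as the " Elder Rule ."
--             birth_edge = si
--             birth_dP= dP[ si ]
--
--             # Merge sector si , the younger sector , to sector sj , the older sector .
--             merged_sector = sectors_to_verts.pop ( si )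
--             for vk in merged_sector :
--                 verts_to_sectors[ vk ] = sj
--
--             sectors_to_verts[ sj ] = sectors_to_verts[ sj ] | merged_sector
--
--             # Record persistence pair if persistence is greater that zero .
--             if abs( death_dP- birth_dP) :
--                 bd_pairs.append(( birth_dP, death_dP) )
--                 bd_edges.append(( birth_edge , death_edge ) )
--                 tau.append( abs( death_dP- birth_dP) )
--
--             # Case iii ) : Edge adds new vertex to the network .
--             # Only one vertex has already appeared in filtration .
--             # Add other vertex to same sector .
--         else :#whats the problem?[]
-- 	            if vi not in verts_to_sectors :
-- 		            sj = verts_to_sectors[ vj ]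
-- 		            sectors_to_verts[ sj ].add ( vi )
-- 		            verts_to_sectors[ vi ] = sj
-- 	            else :
-- 		            si = verts_to_sectors[ vi ]
-- 		            sectors_to_verts[ si ].add ( vj )
-- 		            verts_to_sectors[ vj ] = si
--     return bd_pairs , bd_edges , tau , skeleton
-- ===== SOURCE B (Python) =====
-- # Union-find on sectors: each vertex keeps the birth edge it was first assigned to;
-- # merges record one link in a sector-forest instead of relabelling every vertex.
-- def persist_alg(edge_list, dP, ascending=True):
--     NE = len(edge_list)
--     order = sorted(range(NE), key=lambda e: dP[e], reverse=not ascending)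
--     sector = {}   # vertex -> birth edge assigned at first appearance (never rewritten)
--     merged = {}   # birth edge -> birth edge of the sector it was merged into
--     def find(s):
--         while s in merged:
--             s = merged[s]
--         return s
--     bd_pairs, bd_edges, tau = [], [], []
--     skeleton = set()
--     for ei in order:
--         vi, vj = edge_list[ei]
--         si = find(sector[vi]) if vi in sector else None
--         sj = find(sector[vj]) if vj in sector else None
--         if si is not None and si == sj:
--             continue
--         skeleton.add(ei)
--         if si is None and sj is None:
--             sector[vi] = ei
--             sector[vj] = ei
--         elif si is not None and sj is not None:
--             if (ascending and dP[si] < dP[sj]) or (not ascending and dP[si] > dP[sj]):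
--                 si, sj = sj, si
--             merged[si] = sj
--             t = abs(dP[ei] - dP[si])
--             if t:
--                 bd_pairs.append((dP[si], dP[ei]))
--                 bd_edges.append((si, ei))
--                 tau.append(t)
--         elif si is None:
--             sector[vi] = sj
--         else:
--             sector[vj] = si
--     return bd_pairs, bd_edges, tau, skeleton
-- ===== Notes on version B (the rewrite author's own statement) =====
-- stated objective: alternative
-- what changed: A relabels every vertex of the absorbed sector on each merge and maintains a sector->vertex-set dictionary; B drops both and keeps a union-find forest on sector birth labels (each vertex keeps its first label, a merge records one link, roots are found by chasing links), preserving the Elder Rule tie-breaking exactly.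
import Mathlib
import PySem

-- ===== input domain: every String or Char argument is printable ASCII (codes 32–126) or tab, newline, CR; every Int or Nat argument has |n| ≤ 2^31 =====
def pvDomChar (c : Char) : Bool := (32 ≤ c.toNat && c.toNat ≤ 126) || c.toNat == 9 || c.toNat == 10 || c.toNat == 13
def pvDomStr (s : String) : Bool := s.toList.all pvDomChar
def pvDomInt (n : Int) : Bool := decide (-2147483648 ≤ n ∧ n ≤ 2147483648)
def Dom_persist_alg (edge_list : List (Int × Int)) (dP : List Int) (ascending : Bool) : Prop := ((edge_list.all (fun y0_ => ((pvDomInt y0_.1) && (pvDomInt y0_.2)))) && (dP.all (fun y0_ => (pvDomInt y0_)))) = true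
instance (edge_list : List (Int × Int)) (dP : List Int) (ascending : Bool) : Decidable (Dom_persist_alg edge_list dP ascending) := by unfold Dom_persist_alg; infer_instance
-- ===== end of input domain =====

-- B replaces A's per-merge relabelling of every vertex of the absorbed sector (and its
-- sector->vertex-set dictionary) by a union-find forest on sector labels: each vertex keeps the
-- birth edge it was first assigned, merges record a single link.  Equal return values on Pre_.

-- ===== PORT A =====
-- loop state of A: sectors_to_verts, verts_to_sectors, skeleton, bd_pairs, bd_edges, tau
structure StA where
  s2v : PySem.Dict Int (PySem.Set Int)
  v2s : PySem.Dict Int Int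
  skel : PySem.Set Int
  bd : List (Int × Int)
  bde : List (Int × Int)
  tau : List Int
deriving Repr, DecidableEq

def stepA (edge_list : List (Int × Int)) (dP : List Int) (ascending : Bool) (st : StA) (ei : Int) : StA :=
  let vv := PySem.List.pyGetD edge_list ei (0, 0)
  let vi := vv.1
  let vj := vv.2
  if st.v2s.contains vi && st.v2s.contains vj && (st.v2s.get? vi == st.v2s.get? vj) then st
  else
    let skel := st.skel.add ei
    if !st.v2s.contains vi && !st.v2s.contains vj then
      { st with s2v := st.s2v.insert ei (PySem.Set.ofList [vi, vj]),
                v2s := (st.v2s.insert vi ei).insert vj ei, skel := skel }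
    else if st.v2s.contains vi && st.v2s.contains vj && !(st.v2s.get? vi == st.v2s.get? vj) then
      let deathdP := PySem.List.pyGetD dP ei 0
      let si0 := st.v2s.getD vi 0
      let sj0 := st.v2s.getD vj 0
      let p := if (ascending && decide (PySem.List.pyGetD dP si0 0 < PySem.List.pyGetD dP sj0 0))
                 || (!ascending && decide (PySem.List.pyGetD dP si0 0 > PySem.List.pyGetD dP sj0 0))
               then (sj0, si0) else (si0, sj0)
      let si := p.1
      let sj := p.2
      let birthdP := PySem.List.pyGetD dP si 0
      -- merged_sector = sectors_to_verts.pop(si), ported as getD + erase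
      let ms := st.s2v.getD si PySem.Set.empty
      let s2v1 := st.s2v.erase si
      let v2s1 := ms.foldl (fun d vk => d.insert vk sj) st.v2s
      let s2v2 := s2v1.insert sj (PySem.Set.union (s2v1.getD sj PySem.Set.empty) ms)
      -- if abs(death_dP - birth_dP):
      if (deathdP - birthdP).natAbs ≠ 0 then
        { s2v := s2v2, v2s := v2s1, skel := skel,
          bd := st.bd ++ [(birthdP, deathdP)], bde := st.bde ++ [(si, ei)],
          tau := st.tau ++ [((deathdP - birthdP).natAbs : Int)] }
      else
        { s2v := s2v2, v2s := v2s1, skel := skel, bd := st.bd, bde := st.bde, tau := st.tau }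
    else
      if !st.v2s.contains vi then
        let sj := st.v2s.getD vj 0
        { st with s2v := st.s2v.modify sj PySem.Set.empty (fun S => PySem.Set.add S vi),
                  v2s := st.v2s.insert vi sj, skel := skel }
      else
        let si := st.v2s.getD vi 0
        { st with s2v := st.s2v.modify si PySem.Set.empty (fun S => PySem.Set.add S vj),
                  v2s := st.v2s.insert vj si, skel := skel }

def persist_alg (edge_list : List (Int × Int)) (dP : List Int) (ascending : Bool) : (List (Int × Int)) × (List (Int × Int)) × List Int × List Int :=
  let NE := PySem.List.len edge_list
  let sorted_edges := PySem.List.sorted (PySem.List.pyRange 0 NE 1) (fun e => PySem.List.pyGetD dP e 0) (!ascending)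
  -- enumerate's index i is unused by the body, so the fold runs over the edges directly
  let fin := sorted_edges.foldl (stepA edge_list dP ascending)
    ⟨PySem.Dict.empty, PySem.Dict.empty, PySem.Set.empty, [], [], []⟩
  (fin.bd, fin.bde, fin.tau, fin.skel)

-- ===== PORT B =====
-- loop state of B: sector (vertex -> birth edge at first appearance), merged (sector forest), outputs
structure StB where
  sector : PySem.Dict Int Int
  merged : PySem.Dict Int Int
  skel : PySem.Set Int
  bd : List (Int × Int)
  bde : List (Int × Int)
  tau : List Int
deriving Repr, DecidableEq

-- Source B's `find`: follow merge links to the root label; the while loop is run with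
-- fuel = number of merge links, which bounds the chain length on the acyclic forest the loop builds
def pvFind (merged : PySem.Dict Int Int) : Nat → Int → Int
  | 0, s => s
  | fuel + 1, s =>
    match merged.get? s with
    | none => s
    | some t => pvFind merged fuel t

def stepB (edge_list : List (Int × Int)) (dP : List Int) (ascending : Bool) (st : StB) (ei : Int) : StB :=
  let vv := PySem.List.pyGetD edge_list ei (0, 0)
  let vi := vv.1
  let vj := vv.2
  let si? := if st.sector.contains vi then some (pvFind st.merged st.merged.size (st.sector.getD vi 0)) else none
  let sj? := if st.sector.contains vj then some (pvFind st.merged st.merged.size (st.sector.getD vj 0)) else none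
  if si?.isSome && (si? == sj?) then st
  else
    let skel := st.skel.add ei
    match si?, sj? with
    | none, none =>
      { st with sector := (st.sector.insert vi ei).insert vj ei, skel := skel }
    | some si0, some sj0 =>
      let p := if (ascending && decide (PySem.List.pyGetD dP si0 0 < PySem.List.pyGetD dP sj0 0))
                 || (!ascending && decide (PySem.List.pyGetD dP si0 0 > PySem.List.pyGetD dP sj0 0))
               then (sj0, si0) else (si0, sj0)
      let si := p.1
      let sj := p.2
      let merged := st.merged.insert si sj
      let t := (PySem.List.pyGetD dP ei 0 - PySem.List.pyGetD dP si 0).natAbs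
      if t ≠ 0 then
        { sector := st.sector, merged := merged, skel := skel,
          bd := st.bd ++ [(PySem.List.pyGetD dP si 0, PySem.List.pyGetD dP ei 0)],
          bde := st.bde ++ [(si, ei)], tau := st.tau ++ [(t : Int)] }
      else
        { st with merged := merged, skel := skel }
    | none, some sj0 =>
      { st with sector := st.sector.insert vi sj0, skel := skel }
    | some si0, none =>
      { st with sector := st.sector.insert vj si0, skel := skel }

def persist_alg_alt (edge_list : List (Int × Int)) (dP : List Int) (ascending : Bool) : (List (Int × Int)) × (List (Int × Int)) × List Int × List Int :=
  let NE := PySem.List.len edge_list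
  let order := PySem.List.sorted (PySem.List.pyRange 0 NE 1) (fun e => PySem.List.pyGetD dP e 0) (!ascending)
  let fin := order.foldl (stepB edge_list dP ascending)
    ⟨PySem.Dict.empty, PySem.Dict.empty, PySem.Set.empty, [], [], []⟩
  (fin.bd, fin.bde, fin.tau, fin.skel)

-- ===== PRECONDITION & SPEC =====
-- Python A raises IndexError (in the sort key dP[edgei]) exactly when len(edge_list) > len(dP)
def Pre_persist_alg (edge_list : List (Int × Int)) (dP : List Int) (ascending : Bool) : Prop :=
  edge_list.length ≤ dP.length
instance (edge_list : List (Int × Int)) (dP : List Int) (ascending : Bool) : Decidable (Pre_persist_alg edge_list dP ascending) := by unfold Pre_persist_alg; infer_instance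

def pvWitness_persist_alg : (List (Int × Int)) × List Int × Bool := ([(0, 1), (1, 2), (0, 2)], [1, 2, 3], true)

def Spec_persist_alg (edge_list : List (Int × Int)) (dP : List Int) (ascending : Bool) (out : (List (Int × Int)) × (List (Int × Int)) × List Int × List Int) : Prop := out = persist_alg_alt edge_list dP ascending
instance (edge_list : List (Int × Int)) (dP : List Int) (ascending : Bool) (out : (List (Int × Int)) × (List (Int × Int)) × List Int × List Int) : Decidable (Spec_persist_alg edge_list dP ascending out) := by unfold Spec_persist_alg; infer_instance

-- ===== CLAIM (what is proved, stated in full; the proofs are below) =====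
def Claim_equal_persist_alg : Prop := ∀ (edge_list : List (Int × Int)) (dP : List Int) (ascending : Bool), Dom_persist_alg edge_list dP ascending → Pre_persist_alg edge_list dP ascending → Spec_persist_alg edge_list dP ascending (persist_alg edge_list dP ascending)

-- ===== LEMMAS AND PROOFS =====

-- reachability in the sector forest: s reaches root r
inductive pvReach (m : PySem.Dict Int Int) : Int → Int → Prop
  | root (s : Int) : m.contains s = false → pvReach m s s
  | step (s t r : Int) : m.get? s = some t → pvReach m t r → pvReach m s r

-- well-ranked forest: along every link the rank strictly increases, key ranks below size
def pvWR (m : PySem.Dict Int Int) : Prop :=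
  ∃ r : Int → Nat, ∀ k v, m.get? k = some v → r k < r v ∧ r k < m.size

theorem pvReach_det {m : PySem.Dict Int Int} {s r r' : Int}
    (h : pvReach m s r) (h' : pvReach m s r') : r = r' := by
  induction h generalizing r' with
  | root s hc =>
    cases h' with
    | root => rfl
    | step s t r' hget =>
      rw [PySem.Dict.contains_eq_isSome_get?, hget] at hc; simp at hc
  | step s t r hget hr ih =>
    cases h' with
    | root _ hc =>
      rw [PySem.Dict.contains_eq_isSome_get?, hget] at hc; simp at hc
    | step _ t' r' hget' hr' =>
      rw [hget] at hget'
      exact ih (by injection hget' with h'; rwa [h'])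

theorem pvReach_root_out {m : PySem.Dict Int Int} {s r : Int} (h : pvReach m s r) :
    m.contains r = false := by
  induction h with
  | root _ hc => exact hc
  | step => assumption

theorem pvFind_of_not_contains {m : PySem.Dict Int Int} {s : Int} (h : m.contains s = false)
    (fuel : Nat) : pvFind m fuel s = s := by
  have hg : m.get? s = none := by
    rw [PySem.Dict.contains_eq_isSome_get?] at h
    exact Option.not_isSome_iff_eq_none.mp (by simp [h])
  cases fuel with
  | zero => rfl
  | succ fuel => simp [pvFind, hg]

theorem pvFind_reach {m : PySem.Dict Int Int} (hw : pvWR m) (s : Int) :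
    pvReach m s (pvFind m m.size s) := by
  obtain ⟨r, hr⟩ := hw
  suffices h : ∀ (fuel : Nat) (s : Int), (m.contains s = true → m.size - r s ≤ fuel) →
      pvReach m s (pvFind m fuel s) by
    exact h m.size s (fun _ => Nat.sub_le _ _)
  intro fuel
  induction fuel with
  | zero =>
    intro s hs
    by_cases hc : m.contains s = true
    · obtain ⟨v, hv⟩ : ∃ v, m.get? s = some v := by
        have h := PySem.Dict.contains_eq_isSome_get? m s
        rw [hc] at h
        exact Option.isSome_iff_exists.mp h.symm
      exact absurd (hs hc) (by have := (hr s v hv).2; omega)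
    · exact pvReach.root s (by simpa using hc)
  | succ fuel ih =>
    intro s hs
    cases hg : m.get? s with
    | none =>
      have hc : m.contains s = false := by
        rw [PySem.Dict.contains_eq_isSome_get?, hg]; rfl
      simp [pvFind, hg]
      exact pvReach.root s hc
    | some t =>
      have hst := hr s t hg
      have hc : m.contains s = true := by
        rw [PySem.Dict.contains_eq_isSome_get?, hg]; rfl
      simp only [pvFind, hg]
      refine pvReach.step s t _ hg (ih t ?_)
      intro hct
      obtain ⟨u, hu⟩ : ∃ u, m.get? t = some u := by
        have h := PySem.Dict.contains_eq_isSome_get? m t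
        rw [hct] at h
        exact Option.isSome_iff_exists.mp h.symm
      have htu := hr t u hu
      have := hs hc
      omega

theorem pvReach_val {m : PySem.Dict Int Int} {s r : Int} (h : pvReach m s r) :
    r = s ∨ r ∈ m.values := by
  induction h with
  | root => exact Or.inl rfl
  | step s t r hget hr ih =>
    right
    rcases ih with h | h
    · subst h
      have := PySem.Dict.mem_items_of_get?_eq_some (d := m) hget
      simp only [PySem.Dict.values, List.mem_map]
      exact ⟨(s, r), this, rfl⟩
    · exact h

theorem pvWR_insert {m : PySem.Dict Int Int} {a b : Int} (hw : pvWR m)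
    (ha : m.contains a = false) (hb : m.contains b = false) (hab : a ≠ b) :
    pvWR (m.insert a b) := by
  obtain ⟨r, hr⟩ := hw
  refine ⟨fun x => if x = a then m.size else if m.contains x then r x else m.size + 1, ?_⟩
  intro k v hkv
  have hsz : (m.insert a b).size = m.size + 1 := by
    rw [PySem.Dict.size_insert, ha]; simp
  rw [PySem.Dict.get?_insert] at hkv
  by_cases hk : k = a
  · subst hk
    rw [if_pos rfl] at hkv
    injection hkv with hv
    subst hv
    simp [Ne.symm hab, hb, hsz]
  · rw [if_neg hk] at hkv
    have hck : m.contains k = true := by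
      rw [PySem.Dict.contains_eq_isSome_get?, hkv]; rfl
    have hkb := hr k v hkv
    simp only [if_neg hk, hck, if_pos]
    by_cases hv : v = a
    · simp [hv, hsz]; omega
    · rw [if_neg hv]
      by_cases hcv : m.contains v = true <;> simp [hcv, hsz] <;> omega

theorem pvReach_insert {m : PySem.Dict Int Int} {a b s r : Int}
    (ha : m.contains a = false) (hb : m.contains b = false) (hab : a ≠ b)
    (h : pvReach m s r) : pvReach (m.insert a b) s (if r = a then b else r) := by
  induction h with
  | root s hc =>
    by_cases hs : s = a
    · subst hs
      rw [if_pos rfl]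
      refine pvReach.step _ b _ (by rw [PySem.Dict.get?_insert, if_pos rfl]) ?_
      refine pvReach.root b ?_
      rw [PySem.Dict.contains_insert]
      simp [hb, Ne.symm hab]
    · rw [if_neg hs]
      refine pvReach.root s ?_
      rw [PySem.Dict.contains_insert]
      simp [hc, hs]
  | step s t r hget hr ih =>
    have hs : s ≠ a := by
      intro h; subst h
      rw [PySem.Dict.contains_eq_isSome_get?, hget] at ha; simp at ha
    exact pvReach.step s t _ (by rw [PySem.Dict.get?_insert, if_neg hs]; exact hget) ih

theorem pvFind_insert {m : PySem.Dict Int Int} {a b : Int} (hw : pvWR m)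
    (ha : m.contains a = false) (hb : m.contains b = false) (hab : a ≠ b) (s : Int) :
    pvFind (m.insert a b) (m.insert a b).size s
      = (if pvFind m m.size s = a then b else pvFind m m.size s) := by
  have h1 := pvFind_reach (pvWR_insert hw ha hb hab) s
  have h2 := pvReach_insert ha hb hab (pvFind_reach hw s)
  exact pvReach_det h1 h2

-- get? after erase
theorem pvGet?_erase {ν : Type} (d : PySem.Dict Int ν) (k x : Int) :
    (d.erase k).get? x = if x = k then none else d.get? x := by
  obtain ⟨l⟩ := d
  simp only [PySem.Dict.erase, PySem.Dict.get?]
  induction l with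
  | nil => by_cases hxk : x = k <;> simp [hxk]
  | cons p rest ih =>
    rw [List.filter_cons]
    by_cases hpk : p.1 = k
    · rw [if_neg (by simp [hpk])]
      by_cases hxk : x = k
      · rw [if_pos hxk] at ih ⊢; exact ih
      · rw [if_neg hxk] at ih ⊢
        rw [List.find?_cons_of_neg (by simp only [hpk, beq_iff_eq]; exact fun h => hxk h.symm)]
        exact ih
    · rw [if_pos (by simp [hpk])]
      by_cases hpx : p.1 = x
      · have hxk : ¬ (x = k) := by rw [← hpx]; exact hpk
        rw [List.find?_cons_of_pos (by simp [hpx]), List.find?_cons_of_pos (by simp [hpx])]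
        simp [hxk]
      · rw [List.find?_cons_of_neg (by simp [hpx]), List.find?_cons_of_neg (by simp [hpx])]
        exact ih

-- get? after the relabelling fold of A
theorem pvGet?_foldl_insert_const (S : List Int) (d : PySem.Dict Int Int) (c x : Int) :
    (S.foldl (fun d v => d.insert v c) d).get? x = if x ∈ S then some c else d.get? x := by
  induction S generalizing d with
  | nil => simp
  | cons v S ih =>
    simp only [List.foldl_cons, ih, List.mem_cons]
    by_cases hx : x ∈ S
    · simp [hx]
    · by_cases hv : x = v
      · simp [hv]
      · simp [hx, hv, PySem.Dict.get?_insert]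


-- one merge step preserves the three dictionary clauses of the invariant
theorem pvMergeInv (v2s : PySem.Dict Int Int) (s2v : PySem.Dict Int (PySem.Set Int))
    (sector merged : PySem.Dict Int Int) (si sj : Int) (S Sj : PySem.Set Int)
    (h2 : ∀ v, v2s.get? v = (sector.get? v).map (fun s => pvFind merged merged.size s))
    (h3 : ∀ s T, s2v.get? s = some T → ∀ v, (v ∈ T ↔ v2s.get? v = some s))
    (h4 : ∀ s, s2v.contains s = true ↔ ∃ v, v2s.get? v = some s)
    (hWR : pvWR merged)
    (hcsi : merged.contains si = false) (hcsj : merged.contains sj = false) (hne : si ≠ sj)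
    (hSi : s2v.get? si = some S) (hSj : s2v.get? sj = some Sj) :
    (∀ v, (S.foldl (fun d vk => d.insert vk sj) v2s).get? v
        = (sector.get? v).map (fun s => pvFind (merged.insert si sj) (merged.insert si sj).size s)) ∧
    (∀ s T, ((s2v.erase si).insert sj (PySem.Set.union Sj S)).get? s = some T →
        ∀ v, (v ∈ T ↔ (S.foldl (fun d vk => d.insert vk sj) v2s).get? v = some s)) ∧
    (∀ s, ((s2v.erase si).insert sj (PySem.Set.union Sj S)).contains s = true ↔
        ∃ v, (S.foldl (fun d vk => d.insert vk sj) v2s).get? v = some s) ∧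
    pvWR (merged.insert si sj) := by
  have hpreS : ∀ v, v ∈ S ↔ v2s.get? v = some si := h3 si S hSi
  have hpreJ : ∀ v, v ∈ Sj ↔ v2s.get? v = some sj := h3 sj Sj hSj
  have hfind := pvFind_insert hWR hcsi hcsj hne
  have hv1 : ∀ x, (S.foldl (fun d vk => d.insert vk sj) v2s).get? x
      = if x ∈ S then some sj else v2s.get? x := pvGet?_foldl_insert_const S v2s sj
  have hs2 : ∀ s, ((s2v.erase si).insert sj (PySem.Set.union Sj S)).get? s
      = if s = sj then some (PySem.Set.union Sj S) else if s = si then none else s2v.get? s := by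
    intro s
    rw [PySem.Dict.get?_insert, pvGet?_erase]
  refine ⟨?_, ?_, ?_, pvWR_insert hWR hcsi hcsj hne⟩
  · -- clause 2
    intro v
    rw [hv1 v, h2 v]
    cases hs : sector.get? v with
    | none =>
      have hvS : v ∉ S := by
        intro hm
        have := (hpreS v).mp hm
        rw [h2 v, hs] at this
        cases this
      simp [hvS]
    | some s0 =>
      simp only [Option.map_some]
      rw [hfind s0]
      have hvS : v ∈ S ↔ pvFind merged merged.size s0 = si := by
        rw [hpreS v, h2 v, hs]
        simp
      by_cases hF0 : pvFind merged merged.size s0 = si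
      · rw [if_pos (hvS.mpr hF0), if_pos hF0]
      · rw [if_neg (fun hm => hF0 (hvS.mp hm)), if_neg hF0]
  · -- clause 3
    intro s T hT v
    rw [hs2 s] at hT
    rw [hv1 v]
    by_cases hsj : s = sj
    · rw [if_pos hsj] at hT
      injection hT with hT
      subst hT
      rw [PySem.Set.mem_union, hsj]
      constructor
      · rintro (hmJ | hmS)
        · have hvx := (hpreJ v).mp hmJ
          by_cases hvS : v ∈ S
          · rw [if_pos hvS]
          · rw [if_neg hvS]; exact hvx
        · rw [if_pos hmS]
      · intro hg
        by_cases hvS : v ∈ S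
        · exact Or.inr hvS
        · rw [if_neg hvS] at hg
          exact Or.inl ((hpreJ v).mpr hg)
    · rw [if_neg hsj] at hT
      by_cases hsi : s = si
      · rw [if_pos hsi] at hT
        cases hT
      · rw [if_neg hsi] at hT
        have hold := h3 s T hT v
        by_cases hvS : v ∈ S
        · rw [if_pos hvS]
          constructor
          · intro hvT
            have h1 := hold.mp hvT
            have h2' := (hpreS v).mp hvS
            rw [h1] at h2'
            injection h2' with h2'
            exact absurd h2' hsi
          · intro hg
            injection hg with hg
            exact absurd hg.symm hsj
        · rw [if_neg hvS]
          exact hold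
  · -- clause 4
    intro s
    rw [PySem.Dict.contains_eq_isSome_get?, hs2 s]
    by_cases hsj : s = sj
    · rw [if_pos hsj]
      have hw : ∃ v0, v2s.get? v0 = some sj := (h4 sj).mp
        (by rw [PySem.Dict.contains_eq_isSome_get?, hSj]; rfl)
      obtain ⟨v0, hv0⟩ := hw
      constructor
      · intro _
        refine ⟨v0, ?_⟩
        have hv0S : v0 ∉ S := by
          intro hm
          have := (hpreS v0).mp hm
          rw [hv0] at this
          injection this with hh
          exact hne hh.symm
        rw [hv1 v0, if_neg hv0S, hv0, hsj]
      · intro _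
        simp
    · rw [if_neg hsj]
      by_cases hsi : s = si
      · subst hsi
        rw [if_pos rfl]
        constructor
        · intro hh
          cases hh
        · rintro ⟨v, hv⟩
          rw [hv1 v] at hv
          by_cases hvS : v ∈ S
          · rw [if_pos hvS] at hv
            injection hv with hh
            exact absurd hh (Ne.symm hne)
          · rw [if_neg hvS] at hv
            have := (hpreS v).mpr hv
            exact absurd this hvS
      · rw [if_neg hsi, ← PySem.Dict.contains_eq_isSome_get?, h4 s]
        constructor
        · rintro ⟨v, hv⟩
          refine ⟨v, ?_⟩
          have hvS : v ∉ S := by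
            intro hm
            have := (hpreS v).mp hm
            rw [hv] at this
            injection this with hh
            exact hsi hh
          rw [hv1 v, if_neg hvS]
          exact hv
        · rintro ⟨v, hv⟩
          rw [hv1 v] at hv
          by_cases hvS : v ∈ S
          · rw [if_pos hvS] at hv
            injection hv with hh
            exact absurd hh.symm hsj
          · rw [if_neg hvS] at hv
            exact ⟨v, hv⟩

-- the simulation invariant, parameterised by the edges still to process
def InvP (L : List Int) (a : StA) (b : StB) : Prop :=
  a.bd = b.bd ∧ a.bde = b.bde ∧ a.tau = b.tau ∧ a.skel = b.skel ∧
  (∀ v, a.v2s.get? v = (b.sector.get? v).map (fun s => pvFind b.merged b.merged.size s)) ∧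
  (∀ s S, a.s2v.get? s = some S → ∀ v, (v ∈ S ↔ a.v2s.get? v = some s)) ∧
  (∀ s, a.s2v.contains s = true ↔ ∃ v, a.v2s.get? v = some s) ∧
  pvWR b.merged ∧
  (∀ e ∈ L, b.merged.contains e = false ∧ e ∉ b.merged.values ∧ (∀ v, b.sector.get? v ≠ some e))

theorem InvP_step (edge_list : List (Int × Int)) (dP : List Int) (ascending : Bool)
    {L : List Int} {a : StA} {b : StB} {e : Int} (hnd : e ∉ L)
    (h : InvP (e :: L) a b) :
    InvP L (stepA edge_list dP ascending a e) (stepB edge_list dP ascending b e) := by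
  obtain ⟨hbd, hbde, htau, hskel, h2, h3, h4, hWR, hF⟩ := h
  obtain ⟨hfc, hfv, hfs⟩ := hF e List.mem_cons_self
  have hFtail : ∀ e' ∈ L, b.merged.contains e' = false ∧ e' ∉ b.merged.values ∧
      ∀ v, b.sector.get? v ≠ some e' :=
    fun e' he' => hF e' (List.mem_cons_of_mem _ he')
  have hroot : ∀ s, b.merged.contains (pvFind b.merged b.merged.size s) = false :=
    fun s => pvReach_root_out (pvFind_reach hWR s)
  have hFval : ∀ s, pvFind b.merged b.merged.size s = s ∨
      pvFind b.merged b.merged.size s ∈ b.merged.values :=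
    fun s => pvReach_val (pvFind_reach hWR s)
  have hnotv2s : ∀ v, a.v2s.get? v ≠ some e := by
    intro v hv
    rw [h2 v] at hv
    cases hs : b.sector.get? v with
    | none => rw [hs] at hv; cases hv
    | some s0 =>
      rw [hs] at hv
      have hv' : pvFind b.merged b.merged.size s0 = e := by
        simpa using hv
      rcases hFval s0 with hc | hc
      · exact hfs v (by rw [hs, ← hv', hc])
      · exact hfv (hv' ▸ hc)
  have hgvi := h2 (PySem.List.pyGetD edge_list e (0, 0)).1
  have hgvj := h2 (PySem.List.pyGetD edge_list e (0, 0)).2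
  cases hsvi : b.sector.get? (PySem.List.pyGetD edge_list e (0, 0)).1 with
  | none =>
    cases hsvj : b.sector.get? (PySem.List.pyGetD edge_list e (0, 0)).2 with
    | none =>
      rw [hsvi] at hgvi
      rw [hsvj] at hgvj
      simp only [Option.map_none] at hgvi hgvj
      have hcA1 : a.v2s.contains (PySem.List.pyGetD edge_list e (0, 0)).1 = false := by
        rw [PySem.Dict.contains_eq_isSome_get?, hgvi]; rfl
      have hcA2 : a.v2s.contains (PySem.List.pyGetD edge_list e (0, 0)).2 = false := by
        rw [PySem.Dict.contains_eq_isSome_get?, hgvj]; rfl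
      have hcB1 : b.sector.contains (PySem.List.pyGetD edge_list e (0, 0)).1 = false := by
        rw [PySem.Dict.contains_eq_isSome_get?, hsvi]; rfl
      have hcB2 : b.sector.contains (PySem.List.pyGetD edge_list e (0, 0)).2 = false := by
        rw [PySem.Dict.contains_eq_isSome_get?, hsvj]; rfl
      have hA : stepA edge_list dP ascending a e =
          ⟨a.s2v.insert e (PySem.Set.ofList [(PySem.List.pyGetD edge_list e (0, 0)).1, (PySem.List.pyGetD edge_list e (0, 0)).2]),
           (a.v2s.insert (PySem.List.pyGetD edge_list e (0, 0)).1 e).insert (PySem.List.pyGetD edge_list e (0, 0)).2 e,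
           a.skel.add e, a.bd, a.bde, a.tau⟩ := by
        simp [stepA, hcA1, hcA2]
      have hB : stepB edge_list dP ascending b e =
          ⟨(b.sector.insert (PySem.List.pyGetD edge_list e (0, 0)).1 e).insert (PySem.List.pyGetD edge_list e (0, 0)).2 e,
           b.merged, b.skel.add e, b.bd, b.bde, b.tau⟩ := by
        simp [stepB, hcB1, hcB2]
      rw [hA, hB]
      refine ⟨hbd, hbde, htau, by rw [hskel], ?_, ?_, ?_, hWR, ?_⟩
      · -- clause 2
        intro x
        show ((a.v2s.insert _ e).insert _ e).get? x = _
        simp only [PySem.Dict.get?_insert]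
        by_cases hxj : x = (PySem.List.pyGetD edge_list e (0, 0)).2
        · simp [hxj, pvFind_of_not_contains hfc]
        · by_cases hxi : x = (PySem.List.pyGetD edge_list e (0, 0)).1
          · simp [hxi, pvFind_of_not_contains hfc]
          · simp [hxj, hxi, h2 x]
      · -- clause 3
        intro s T hT v
        rw [show (⟨a.s2v.insert e _, _, _, _, _, _⟩ : StA).s2v = a.s2v.insert e
          (PySem.Set.ofList [(PySem.List.pyGetD edge_list e (0, 0)).1, (PySem.List.pyGetD edge_list e (0, 0)).2]) from rfl,
          PySem.Dict.get?_insert] at hT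
        show v ∈ T ↔ ((a.v2s.insert _ e).insert _ e).get? v = some s
        simp only [PySem.Dict.get?_insert]
        by_cases hse : s = e
        · subst hse
          rw [if_pos rfl] at hT
          injection hT with hT
          subst hT
          rw [PySem.Set.mem_ofList, List.mem_cons, List.mem_singleton]
          constructor
          · intro hvT
            rcases hvT with hh | hh
            · rw [hh]
              by_cases hij : (PySem.List.pyGetD edge_list s (0, 0)).1 = (PySem.List.pyGetD edge_list s (0, 0)).2 <;>
                simp [hij]
            · rw [hh]; simp
          · intro hvg
            by_cases hvj : v = (PySem.List.pyGetD edge_list s (0, 0)).2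
            · exact Or.inr hvj
            · by_cases hvi : v = (PySem.List.pyGetD edge_list s (0, 0)).1
              · exact Or.inl hvi
              · rw [if_neg hvj, if_neg hvi] at hvg
                exact absurd hvg (hnotv2s v)
        · rw [if_neg hse] at hT
          have hold := h3 s T hT v
          by_cases hvj : v = (PySem.List.pyGetD edge_list e (0, 0)).2
          · rw [if_pos hvj]
            constructor
            · intro hvT
              have := (hold.mp hvT)
              rw [hvj, hgvj] at this
              cases this
            · intro hes
              injection hes with hes
              exact absurd hes.symm hse
          · rw [if_neg hvj]
            by_cases hvi : v = (PySem.List.pyGetD edge_list e (0, 0)).1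
            · rw [if_pos hvi]
              constructor
              · intro hvT
                have := (hold.mp hvT)
                rw [hvi, hgvi] at this
                cases this
              · intro hes
                injection hes with hes
                exact absurd hes.symm hse
            · rw [if_neg hvi]
              exact hold
      · -- clause 4
        intro s
        show (a.s2v.insert e _).contains s = true ↔ _
        rw [PySem.Dict.contains_insert]
        by_cases hse : s = e
        · subst hse
          simp only [BEq.rfl, Bool.true_or, true_iff]
          refine ⟨(PySem.List.pyGetD edge_list s (0, 0)).2, ?_⟩
          show ((a.v2s.insert _ s).insert _ s).get? _ = some s
          rw [PySem.Dict.get?_insert, if_pos rfl]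
        · rw [show (s == e) = false by simp [hse], Bool.false_or, h4 s]
          constructor
          · rintro ⟨v, hv⟩
            have hvj : ¬ (v = (PySem.List.pyGetD edge_list e (0, 0)).2) := by
              intro hh; rw [hh, hgvj] at hv; cases hv
            have hvi : ¬ (v = (PySem.List.pyGetD edge_list e (0, 0)).1) := by
              intro hh; rw [hh, hgvi] at hv; cases hv
            refine ⟨v, ?_⟩
            show ((a.v2s.insert _ e).insert _ e).get? v = some s
            rw [PySem.Dict.get?_insert, if_neg hvj, PySem.Dict.get?_insert, if_neg hvi]
            exact hv
          · rintro ⟨v, hv⟩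
            rw [show ((⟨_, (a.v2s.insert _ e).insert _ e, _, _, _, _⟩ : StA)).v2s =
              (a.v2s.insert (PySem.List.pyGetD edge_list e (0, 0)).1 e).insert (PySem.List.pyGetD edge_list e (0, 0)).2 e from rfl,
              PySem.Dict.get?_insert, PySem.Dict.get?_insert] at hv
            by_cases hvj : v = (PySem.List.pyGetD edge_list e (0, 0)).2
            · rw [if_pos hvj] at hv
              injection hv with hv
              exact absurd hv.symm hse
            · rw [if_neg hvj] at hv
              by_cases hvi : v = (PySem.List.pyGetD edge_list e (0, 0)).1
              · rw [if_pos hvi] at hv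
                injection hv with hv
                exact absurd hv.symm hse
              · rw [if_neg hvi] at hv
                exact ⟨v, hv⟩
      · -- freshness
        intro e' he'
        obtain ⟨hA1, hA2, hA3⟩ := hFtail e' he'
        refine ⟨hA1, hA2, ?_⟩
        intro v
        show ((b.sector.insert _ e).insert _ e).get? v ≠ some e'
        have hee' : ¬ (e = e') := fun hh => hnd (hh ▸ he')
        rw [PySem.Dict.get?_insert, PySem.Dict.get?_insert]
        by_cases hvj : v = (PySem.List.pyGetD edge_list e (0, 0)).2
        · rw [if_pos hvj]; intro hh; injection hh with hh; exact hee' hh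
        · rw [if_neg hvj]
          by_cases hvi : v = (PySem.List.pyGetD edge_list e (0, 0)).1
          · rw [if_pos hvi]; intro hh; injection hh with hh; exact hee' hh
          · rw [if_neg hvi]; exact hA3 v
    | some s0j =>
      rw [hsvi] at hgvi
      rw [hsvj] at hgvj
      simp only [Option.map_none, Option.map_some] at hgvi hgvj
      have hcA1 : a.v2s.contains (PySem.List.pyGetD edge_list e (0, 0)).1 = false := by
        rw [PySem.Dict.contains_eq_isSome_get?, hgvi]; rfl
      have hcA2 : a.v2s.contains (PySem.List.pyGetD edge_list e (0, 0)).2 = true := by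
        rw [PySem.Dict.contains_eq_isSome_get?, hgvj]; rfl
      have hcB1 : b.sector.contains (PySem.List.pyGetD edge_list e (0, 0)).1 = false := by
        rw [PySem.Dict.contains_eq_isSome_get?, hsvi]; rfl
      have hcB2 : b.sector.contains (PySem.List.pyGetD edge_list e (0, 0)).2 = true := by
        rw [PySem.Dict.contains_eq_isSome_get?, hsvj]; rfl
      have hvij : (PySem.List.pyGetD edge_list e (0, 0)).1 ≠ (PySem.List.pyGetD edge_list e (0, 0)).2 := by
        intro hh; rw [hh, hsvj] at hsvi; cases hsvi
      have hrootj : b.merged.contains (pvFind b.merged b.merged.size s0j) = false := hroot s0j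
      obtain ⟨Sj, hSj⟩ : ∃ Sj, a.s2v.get? (pvFind b.merged b.merged.size s0j) = some Sj := by
        have hc : a.s2v.contains (pvFind b.merged b.merged.size s0j) = true :=
          (h4 _).mpr ⟨(PySem.List.pyGetD edge_list e (0, 0)).2, hgvj⟩
        rw [PySem.Dict.contains_eq_isSome_get?] at hc
        exact Option.isSome_iff_exists.mp hc
      have hpreJ := h3 _ Sj hSj
      have hA : stepA edge_list dP ascending a e =
          ⟨a.s2v.modify (pvFind b.merged b.merged.size s0j) PySem.Set.empty
             (fun S => PySem.Set.add S (PySem.List.pyGetD edge_list e (0, 0)).1),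
           a.v2s.insert (PySem.List.pyGetD edge_list e (0, 0)).1 (pvFind b.merged b.merged.size s0j),
           a.skel.add e, a.bd, a.bde, a.tau⟩ := by
        simp [stepA, hcA1, hcA2, PySem.Dict.getD_eq_get?_getD, hgvj]
      have hB : stepB edge_list dP ascending b e =
          ⟨b.sector.insert (PySem.List.pyGetD edge_list e (0, 0)).1 (pvFind b.merged b.merged.size s0j),
           b.merged, b.skel.add e, b.bd, b.bde, b.tau⟩ := by
        simp [stepB, hcB1, hcB2, PySem.Dict.getD_eq_get?_getD, hsvj]
      rw [hA, hB]
      refine ⟨hbd, hbde, htau, by rw [hskel], ?_, ?_, ?_, hWR, ?_⟩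
      · -- clause 2
        intro x
        show (a.v2s.insert _ _).get? x = _
        rw [PySem.Dict.get?_insert, PySem.Dict.get?_insert]
        by_cases hxi : x = (PySem.List.pyGetD edge_list e (0, 0)).1
        · rw [if_pos hxi, if_pos hxi]
          simp [pvFind_of_not_contains hrootj]
        · rw [if_neg hxi, if_neg hxi]
          exact h2 x
      · -- clause 3
        intro s T hT v
        rw [show (⟨a.s2v.modify _ _ _, _, _, _, _, _⟩ : StA).s2v = a.s2v.modify (pvFind b.merged b.merged.size s0j)
              PySem.Set.empty (fun S => PySem.Set.add S (PySem.List.pyGetD edge_list e (0, 0)).1) from rfl,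
            PySem.Dict.modify, PySem.Dict.get?_insert] at hT
        show v ∈ T ↔ (a.v2s.insert _ _).get? v = some s
        rw [PySem.Dict.get?_insert]
        by_cases hsG : s = pvFind b.merged b.merged.size s0j
        · rw [if_pos hsG] at hT
          injection hT with hT
          subst hT
          rw [PySem.Dict.getD_eq_get?_getD, hSj]
          rw [show (some Sj).getD PySem.Set.empty = Sj from rfl, PySem.Set.mem_add]
          by_cases hvi : v = (PySem.List.pyGetD edge_list e (0, 0)).1
          · rw [if_pos hvi, hsG]
            simp [hvi]
          · rw [if_neg hvi]
            simp only [hvi, or_false]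
            rw [hpreJ v, hsG]
        · rw [if_neg hsG] at hT
          have hold := h3 s T hT v
          by_cases hvi : v = (PySem.List.pyGetD edge_list e (0, 0)).1
          · rw [if_pos hvi]
            constructor
            · intro hvT
              have := hold.mp hvT
              rw [hvi, hgvi] at this
              cases this
            · intro hes
              injection hes with hes
              exact absurd hes.symm hsG
          · rw [if_neg hvi]
            exact hold
      · -- clause 4
        intro s
        show (a.s2v.modify _ _ _).contains s = true ↔ _
        rw [PySem.Dict.contains_modify]
        by_cases hsG : s = pvFind b.merged b.merged.size s0j
        · rw [show (s == pvFind b.merged b.merged.size s0j) = true by simp [hsG], Bool.true_or]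
          simp only [true_iff]
          refine ⟨(PySem.List.pyGetD edge_list e (0, 0)).2, ?_⟩
          show (a.v2s.insert _ _).get? _ = some s
          rw [PySem.Dict.get?_insert, if_neg (fun hh => hvij (hh.symm)), hgvj, hsG]
        · rw [show (s == pvFind b.merged b.merged.size s0j) = false by simp [hsG], Bool.false_or, h4 s]
          constructor
          · rintro ⟨v, hv⟩
            have hvi : ¬ (v = (PySem.List.pyGetD edge_list e (0, 0)).1) := by
              intro hh; rw [hh, hgvi] at hv; cases hv
            refine ⟨v, ?_⟩
            show (a.v2s.insert _ _).get? v = some s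
            rw [PySem.Dict.get?_insert, if_neg hvi]
            exact hv
          · rintro ⟨v, hv⟩
            rw [show (⟨_, a.v2s.insert _ _, _, _, _, _⟩ : StA).v2s =
                  a.v2s.insert (PySem.List.pyGetD edge_list e (0, 0)).1 (pvFind b.merged b.merged.size s0j) from rfl,
                PySem.Dict.get?_insert] at hv
            by_cases hvi : v = (PySem.List.pyGetD edge_list e (0, 0)).1
            · rw [if_pos hvi] at hv
              injection hv with hv
              exact absurd hv.symm hsG
            · rw [if_neg hvi] at hv
              exact ⟨v, hv⟩
      · -- freshness
        intro e' he'
        obtain ⟨hA1, hA2, hA3⟩ := hFtail e' he'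
        refine ⟨hA1, hA2, ?_⟩
        intro v
        show (b.sector.insert _ _).get? v ≠ some e'
        rw [PySem.Dict.get?_insert]
        by_cases hvi : v = (PySem.List.pyGetD edge_list e (0, 0)).1
        · rw [if_pos hvi]
          intro hh
          injection hh with hh
          rcases hFval s0j with hc | hc
          · rw [hc] at hh
            exact hA3 (PySem.List.pyGetD edge_list e (0, 0)).2 (by rw [hsvj, hh])
          · exact hA2 (hh ▸ hc)
        · rw [if_neg hvi]
          exact hA3 v
  | some s0i =>
    cases hsvj : b.sector.get? (PySem.List.pyGetD edge_list e (0, 0)).2 with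
    | none =>
      rw [hsvi] at hgvi
      rw [hsvj] at hgvj
      simp only [Option.map_none, Option.map_some] at hgvi hgvj
      have hcA1 : a.v2s.contains (PySem.List.pyGetD edge_list e (0, 0)).1 = true := by
        rw [PySem.Dict.contains_eq_isSome_get?, hgvi]; rfl
      have hcA2 : a.v2s.contains (PySem.List.pyGetD edge_list e (0, 0)).2 = false := by
        rw [PySem.Dict.contains_eq_isSome_get?, hgvj]; rfl
      have hcB1 : b.sector.contains (PySem.List.pyGetD edge_list e (0, 0)).1 = true := by
        rw [PySem.Dict.contains_eq_isSome_get?, hsvi]; rfl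
      have hcB2 : b.sector.contains (PySem.List.pyGetD edge_list e (0, 0)).2 = false := by
        rw [PySem.Dict.contains_eq_isSome_get?, hsvj]; rfl
      have hvij : (PySem.List.pyGetD edge_list e (0, 0)).1 ≠ (PySem.List.pyGetD edge_list e (0, 0)).2 := by
        intro hh; rw [hh, hsvj] at hsvi; cases hsvi
      have hrooti : b.merged.contains (pvFind b.merged b.merged.size s0i) = false := hroot s0i
      obtain ⟨Si, hSi⟩ : ∃ Si, a.s2v.get? (pvFind b.merged b.merged.size s0i) = some Si := by
        have hc : a.s2v.contains (pvFind b.merged b.merged.size s0i) = true :=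
          (h4 _).mpr ⟨(PySem.List.pyGetD edge_list e (0, 0)).1, hgvi⟩
        rw [PySem.Dict.contains_eq_isSome_get?] at hc
        exact Option.isSome_iff_exists.mp hc
      have hpreI := h3 _ Si hSi
      have hA : stepA edge_list dP ascending a e =
          ⟨a.s2v.modify (pvFind b.merged b.merged.size s0i) PySem.Set.empty
             (fun S => PySem.Set.add S (PySem.List.pyGetD edge_list e (0, 0)).2),
           a.v2s.insert (PySem.List.pyGetD edge_list e (0, 0)).2 (pvFind b.merged b.merged.size s0i),
           a.skel.add e, a.bd, a.bde, a.tau⟩ := by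
        simp [stepA, hcA1, hcA2, PySem.Dict.getD_eq_get?_getD, hgvi]
      have hB : stepB edge_list dP ascending b e =
          ⟨b.sector.insert (PySem.List.pyGetD edge_list e (0, 0)).2 (pvFind b.merged b.merged.size s0i),
           b.merged, b.skel.add e, b.bd, b.bde, b.tau⟩ := by
        simp [stepB, hcB1, hcB2, PySem.Dict.getD_eq_get?_getD, hsvi]
      rw [hA, hB]
      refine ⟨hbd, hbde, htau, by rw [hskel], ?_, ?_, ?_, hWR, ?_⟩
      · -- clause 2
        intro x
        show (a.v2s.insert _ _).get? x = _
        rw [PySem.Dict.get?_insert, PySem.Dict.get?_insert]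
        by_cases hxj : x = (PySem.List.pyGetD edge_list e (0, 0)).2
        · rw [if_pos hxj, if_pos hxj]
          simp [pvFind_of_not_contains hrooti]
        · rw [if_neg hxj, if_neg hxj]
          exact h2 x
      · -- clause 3
        intro s T hT v
        rw [show (⟨a.s2v.modify _ _ _, _, _, _, _, _⟩ : StA).s2v = a.s2v.modify (pvFind b.merged b.merged.size s0i)
              PySem.Set.empty (fun S => PySem.Set.add S (PySem.List.pyGetD edge_list e (0, 0)).2) from rfl,
            PySem.Dict.modify, PySem.Dict.get?_insert] at hT
        show v ∈ T ↔ (a.v2s.insert _ _).get? v = some s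
        rw [PySem.Dict.get?_insert]
        by_cases hsG : s = pvFind b.merged b.merged.size s0i
        · rw [if_pos hsG] at hT
          injection hT with hT
          subst hT
          rw [PySem.Dict.getD_eq_get?_getD, hSi]
          rw [show (some Si).getD PySem.Set.empty = Si from rfl, PySem.Set.mem_add]
          by_cases hvj : v = (PySem.List.pyGetD edge_list e (0, 0)).2
          · rw [if_pos hvj, hsG]
            simp [hvj]
          · rw [if_neg hvj]
            simp only [hvj, or_false]
            rw [hpreI v, hsG]
        · rw [if_neg hsG] at hT
          have hold := h3 s T hT v
          by_cases hvj : v = (PySem.List.pyGetD edge_list e (0, 0)).2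
          · rw [if_pos hvj]
            constructor
            · intro hvT
              have := hold.mp hvT
              rw [hvj, hgvj] at this
              cases this
            · intro hes
              injection hes with hes
              exact absurd hes.symm hsG
          · rw [if_neg hvj]
            exact hold
      · -- clause 4
        intro s
        show (a.s2v.modify _ _ _).contains s = true ↔ _
        rw [PySem.Dict.contains_modify]
        by_cases hsG : s = pvFind b.merged b.merged.size s0i
        · rw [show (s == pvFind b.merged b.merged.size s0i) = true by simp [hsG], Bool.true_or]
          simp only [true_iff]
          refine ⟨(PySem.List.pyGetD edge_list e (0, 0)).1, ?_⟩
          show (a.v2s.insert _ _).get? _ = some s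
          rw [PySem.Dict.get?_insert, if_neg hvij, hgvi, hsG]
        · rw [show (s == pvFind b.merged b.merged.size s0i) = false by simp [hsG], Bool.false_or, h4 s]
          constructor
          · rintro ⟨v, hv⟩
            have hvj : ¬ (v = (PySem.List.pyGetD edge_list e (0, 0)).2) := by
              intro hh; rw [hh, hgvj] at hv; cases hv
            refine ⟨v, ?_⟩
            show (a.v2s.insert _ _).get? v = some s
            rw [PySem.Dict.get?_insert, if_neg hvj]
            exact hv
          · rintro ⟨v, hv⟩
            rw [show (⟨_, a.v2s.insert _ _, _, _, _, _⟩ : StA).v2s =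
                  a.v2s.insert (PySem.List.pyGetD edge_list e (0, 0)).2 (pvFind b.merged b.merged.size s0i) from rfl,
                PySem.Dict.get?_insert] at hv
            by_cases hvj : v = (PySem.List.pyGetD edge_list e (0, 0)).2
            · rw [if_pos hvj] at hv
              injection hv with hv
              exact absurd hv.symm hsG
            · rw [if_neg hvj] at hv
              exact ⟨v, hv⟩
      · -- freshness
        intro e' he'
        obtain ⟨hA1, hA2, hA3⟩ := hFtail e' he'
        refine ⟨hA1, hA2, ?_⟩
        intro v
        show (b.sector.insert _ _).get? v ≠ some e'
        rw [PySem.Dict.get?_insert]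
        by_cases hvj : v = (PySem.List.pyGetD edge_list e (0, 0)).2
        · rw [if_pos hvj]
          intro hh
          injection hh with hh
          rcases hFval s0i with hc | hc
          · rw [hc] at hh
            exact hA3 (PySem.List.pyGetD edge_list e (0, 0)).1 (by rw [hsvi, hh])
          · exact hA2 (hh ▸ hc)
        · rw [if_neg hvj]
          exact hA3 v
    | some s0j =>
      rw [hsvi] at hgvi
      rw [hsvj] at hgvj
      simp only [Option.map_some] at hgvi hgvj
      have hcA1 : a.v2s.contains (PySem.List.pyGetD edge_list e (0, 0)).1 = true := by
        rw [PySem.Dict.contains_eq_isSome_get?, hgvi]; rfl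
      have hcA2 : a.v2s.contains (PySem.List.pyGetD edge_list e (0, 0)).2 = true := by
        rw [PySem.Dict.contains_eq_isSome_get?, hgvj]; rfl
      have hcB1 : b.sector.contains (PySem.List.pyGetD edge_list e (0, 0)).1 = true := by
        rw [PySem.Dict.contains_eq_isSome_get?, hsvi]; rfl
      have hcB2 : b.sector.contains (PySem.List.pyGetD edge_list e (0, 0)).2 = true := by
        rw [PySem.Dict.contains_eq_isSome_get?, hsvj]; rfl
      have hne_i : ∀ e' ∈ L, pvFind b.merged b.merged.size s0i ≠ e' := by
        intro e' he' hh
        obtain ⟨hA1, hA2, hA3⟩ := hFtail e' he'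
        rcases hFval s0i with hc | hc
        · exact hA3 (PySem.List.pyGetD edge_list e (0, 0)).1 (by rw [hsvi, ← hh, hc])
        · exact hA2 (hh ▸ hc)
      have hne_j : ∀ e' ∈ L, pvFind b.merged b.merged.size s0j ≠ e' := by
        intro e' he' hh
        obtain ⟨hA1, hA2, hA3⟩ := hFtail e' he'
        rcases hFval s0j with hc | hc
        · exact hA3 (PySem.List.pyGetD edge_list e (0, 0)).2 (by rw [hsvj, ← hh, hc])
        · exact hA2 (hh ▸ hc)
      by_cases heq : pvFind b.merged b.merged.size s0i = pvFind b.merged b.merged.size s0j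
      · -- both endpoints already in the same sector: skip
        have hA : stepA edge_list dP ascending a e = a := by
          simp [stepA, hcA1, hcA2, hgvi, hgvj, heq]
        have hB : stepB edge_list dP ascending b e = b := by
          simp [stepB, hcB1, hcB2, PySem.Dict.getD_eq_get?_getD, hsvi, hsvj, heq]
        rw [hA, hB]
        exact ⟨hbd, hbde, htau, hskel, h2, h3, h4, hWR, hFtail⟩
      · -- merge of two different sectors
        by_cases hsw : ((ascending && decide (PySem.List.pyGetD dP (pvFind b.merged b.merged.size s0i) 0 < PySem.List.pyGetD dP (pvFind b.merged b.merged.size s0j) 0))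
            || (!ascending && decide (PySem.List.pyGetD dP (pvFind b.merged b.merged.size s0i) 0 > PySem.List.pyGetD dP (pvFind b.merged b.merged.size s0j) 0))) = true
        · -- swapped: the vj-side sector is younger
          have hneIJ : (pvFind b.merged b.merged.size s0j) ≠ (pvFind b.merged b.merged.size s0i) := fun hh => heq hh.symm
          have hrootSI : b.merged.contains (pvFind b.merged b.merged.size s0j) = false := hroot _
          have hrootSJ : b.merged.contains (pvFind b.merged b.merged.size s0i) = false := hroot _
          obtain ⟨SS, hSiSet⟩ : ∃ SS, a.s2v.get? (pvFind b.merged b.merged.size s0j) = some SS := by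
            have hc : a.s2v.contains (pvFind b.merged b.merged.size s0j) = true := (h4 _).mpr ⟨(PySem.List.pyGetD edge_list e (0, 0)).2, hgvj⟩
            rw [PySem.Dict.contains_eq_isSome_get?] at hc
            exact Option.isSome_iff_exists.mp hc
          obtain ⟨TJ, hSjSet⟩ : ∃ TJ, a.s2v.get? (pvFind b.merged b.merged.size s0i) = some TJ := by
            have hc : a.s2v.contains (pvFind b.merged b.merged.size s0i) = true := (h4 _).mpr ⟨(PySem.List.pyGetD edge_list e (0, 0)).1, hgvi⟩
            rw [PySem.Dict.contains_eq_isSome_get?] at hc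
            exact Option.isSome_iff_exists.mp hc
          obtain ⟨hc2', hc3', hc4', hWR'⟩ := pvMergeInv a.v2s a.s2v b.sector b.merged (pvFind b.merged b.merged.size s0j) (pvFind b.merged b.merged.size s0i) SS TJ
            h2 h3 h4 hWR hrootSI hrootSJ hneIJ hSiSet hSjSet
          by_cases ht : (PySem.List.pyGetD dP e 0 - PySem.List.pyGetD dP (pvFind b.merged b.merged.size s0j) 0).natAbs ≠ 0
          · -- persistence positive
            have hA : stepA edge_list dP ascending a e =
                ⟨(a.s2v.erase (pvFind b.merged b.merged.size s0j)).insert (pvFind b.merged b.merged.size s0i) (PySem.Set.union TJ SS),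
                 SS.foldl (fun d vk => d.insert vk (pvFind b.merged b.merged.size s0i)) a.v2s,
                 a.skel.add e,
                 a.bd ++ [(PySem.List.pyGetD dP (pvFind b.merged b.merged.size s0j) 0, PySem.List.pyGetD dP e 0)],
                 a.bde ++ [((pvFind b.merged b.merged.size s0j), e)],
                 a.tau ++ [((PySem.List.pyGetD dP e 0 - PySem.List.pyGetD dP (pvFind b.merged b.merged.size s0j) 0).natAbs : Int)]⟩ := by
              simp [stepA, hcA1, hcA2, hgvi, hgvj, heq, PySem.Dict.getD_eq_get?_getD, hsw, ht,
                pvGet?_erase, hSiSet, hSjSet]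
            have hB : stepB edge_list dP ascending b e =
                ⟨b.sector, b.merged.insert (pvFind b.merged b.merged.size s0j) (pvFind b.merged b.merged.size s0i), b.skel.add e,
                 b.bd ++ [(PySem.List.pyGetD dP (pvFind b.merged b.merged.size s0j) 0, PySem.List.pyGetD dP e 0)],
                 b.bde ++ [((pvFind b.merged b.merged.size s0j), e)],
                 b.tau ++ [((PySem.List.pyGetD dP e 0 - PySem.List.pyGetD dP (pvFind b.merged b.merged.size s0j) 0).natAbs : Int)]⟩ := by
              simp [stepB, hcB1, hcB2, PySem.Dict.getD_eq_get?_getD, hsvi, hsvj, heq, hsw, ht]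
            rw [hA, hB]
            refine ⟨by rw [hbd], by rw [hbde], by rw [htau], by rw [hskel], hc2', hc3', hc4', hWR', ?_⟩
            intro e' he'
            obtain ⟨hA1, hA2, hA3⟩ := hFtail e' he'
            refine ⟨?_, ?_, hA3⟩
            · rw [PySem.Dict.contains_insert]
              simp [hA1, Ne.symm (hne_j e' he')]
            · have hvals : (b.merged.insert (pvFind b.merged b.merged.size s0j) (pvFind b.merged b.merged.size s0i)).values = b.merged.values ++ [(pvFind b.merged b.merged.size s0i)] := by
                rw [PySem.Dict.values, PySem.Dict.items_insert_of_not_contains b.merged (pvFind b.merged b.merged.size s0i) hrootSI,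
                  List.map_append]
                rfl
              show e' ∉ (b.merged.insert (pvFind b.merged b.merged.size s0j) (pvFind b.merged b.merged.size s0i)).values
              rw [hvals]
              intro hm
              rcases List.mem_append.mp hm with hm | hm
              · exact hA2 hm
              · rw [List.mem_singleton] at hm
                exact (hne_i e' he') hm.symm
          · -- persistence zero
            have hA : stepA edge_list dP ascending a e =
                ⟨(a.s2v.erase (pvFind b.merged b.merged.size s0j)).insert (pvFind b.merged b.merged.size s0i) (PySem.Set.union TJ SS),
                 SS.foldl (fun d vk => d.insert vk (pvFind b.merged b.merged.size s0i)) a.v2s,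
                 a.skel.add e, a.bd, a.bde, a.tau⟩ := by
              simp [stepA, hcA1, hcA2, hgvi, hgvj, heq, PySem.Dict.getD_eq_get?_getD, hsw, ht,
                pvGet?_erase, hSiSet, hSjSet]
            have hB : stepB edge_list dP ascending b e =
                ⟨b.sector, b.merged.insert (pvFind b.merged b.merged.size s0j) (pvFind b.merged b.merged.size s0i), b.skel.add e, b.bd, b.bde, b.tau⟩ := by
              simp [stepB, hcB1, hcB2, PySem.Dict.getD_eq_get?_getD, hsvi, hsvj, heq, hsw, ht]
            rw [hA, hB]
            refine ⟨hbd, hbde, htau, by rw [hskel], hc2', hc3', hc4', hWR', ?_⟩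
            intro e' he'
            obtain ⟨hA1, hA2, hA3⟩ := hFtail e' he'
            refine ⟨?_, ?_, hA3⟩
            · rw [PySem.Dict.contains_insert]
              simp [hA1, Ne.symm (hne_j e' he')]
            · have hvals : (b.merged.insert (pvFind b.merged b.merged.size s0j) (pvFind b.merged b.merged.size s0i)).values = b.merged.values ++ [(pvFind b.merged b.merged.size s0i)] := by
                rw [PySem.Dict.values, PySem.Dict.items_insert_of_not_contains b.merged (pvFind b.merged b.merged.size s0i) hrootSI,
                  List.map_append]
                rfl
              show e' ∉ (b.merged.insert (pvFind b.merged b.merged.size s0j) (pvFind b.merged b.merged.size s0i)).values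
              rw [hvals]
              intro hm
              rcases List.mem_append.mp hm with hm | hm
              · exact hA2 hm
              · rw [List.mem_singleton] at hm
                exact (hne_i e' he') hm.symm
        · -- not swapped
          have hneIJ : (pvFind b.merged b.merged.size s0i) ≠ (pvFind b.merged b.merged.size s0j) := heq
          have hrootSI : b.merged.contains (pvFind b.merged b.merged.size s0i) = false := hroot _
          have hrootSJ : b.merged.contains (pvFind b.merged b.merged.size s0j) = false := hroot _
          obtain ⟨SS, hSiSet⟩ : ∃ SS, a.s2v.get? (pvFind b.merged b.merged.size s0i) = some SS := by
            have hc : a.s2v.contains (pvFind b.merged b.merged.size s0i) = true := (h4 _).mpr ⟨(PySem.List.pyGetD edge_list e (0, 0)).1, hgvi⟩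
            rw [PySem.Dict.contains_eq_isSome_get?] at hc
            exact Option.isSome_iff_exists.mp hc
          obtain ⟨TJ, hSjSet⟩ : ∃ TJ, a.s2v.get? (pvFind b.merged b.merged.size s0j) = some TJ := by
            have hc : a.s2v.contains (pvFind b.merged b.merged.size s0j) = true := (h4 _).mpr ⟨(PySem.List.pyGetD edge_list e (0, 0)).2, hgvj⟩
            rw [PySem.Dict.contains_eq_isSome_get?] at hc
            exact Option.isSome_iff_exists.mp hc
          obtain ⟨hc2', hc3', hc4', hWR'⟩ := pvMergeInv a.v2s a.s2v b.sector b.merged (pvFind b.merged b.merged.size s0i) (pvFind b.merged b.merged.size s0j) SS TJ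
            h2 h3 h4 hWR hrootSI hrootSJ hneIJ hSiSet hSjSet
          by_cases ht : (PySem.List.pyGetD dP e 0 - PySem.List.pyGetD dP (pvFind b.merged b.merged.size s0i) 0).natAbs ≠ 0
          · -- persistence positive
            have hA : stepA edge_list dP ascending a e =
                ⟨(a.s2v.erase (pvFind b.merged b.merged.size s0i)).insert (pvFind b.merged b.merged.size s0j) (PySem.Set.union TJ SS),
                 SS.foldl (fun d vk => d.insert vk (pvFind b.merged b.merged.size s0j)) a.v2s,
                 a.skel.add e,
                 a.bd ++ [(PySem.List.pyGetD dP (pvFind b.merged b.merged.size s0i) 0, PySem.List.pyGetD dP e 0)],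
                 a.bde ++ [((pvFind b.merged b.merged.size s0i), e)],
                 a.tau ++ [((PySem.List.pyGetD dP e 0 - PySem.List.pyGetD dP (pvFind b.merged b.merged.size s0i) 0).natAbs : Int)]⟩ := by
              simp [stepA, hcA1, hcA2, hgvi, hgvj, heq, PySem.Dict.getD_eq_get?_getD, hsw, ht,
                pvGet?_erase, Ne.symm hneIJ, hSiSet, hSjSet]
            have hB : stepB edge_list dP ascending b e =
                ⟨b.sector, b.merged.insert (pvFind b.merged b.merged.size s0i) (pvFind b.merged b.merged.size s0j), b.skel.add e,
                 b.bd ++ [(PySem.List.pyGetD dP (pvFind b.merged b.merged.size s0i) 0, PySem.List.pyGetD dP e 0)],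
                 b.bde ++ [((pvFind b.merged b.merged.size s0i), e)],
                 b.tau ++ [((PySem.List.pyGetD dP e 0 - PySem.List.pyGetD dP (pvFind b.merged b.merged.size s0i) 0).natAbs : Int)]⟩ := by
              simp [stepB, hcB1, hcB2, PySem.Dict.getD_eq_get?_getD, hsvi, hsvj, heq, hsw, ht]
            rw [hA, hB]
            refine ⟨by rw [hbd], by rw [hbde], by rw [htau], by rw [hskel], hc2', hc3', hc4', hWR', ?_⟩
            intro e' he'
            obtain ⟨hA1, hA2, hA3⟩ := hFtail e' he'
            refine ⟨?_, ?_, hA3⟩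
            · rw [PySem.Dict.contains_insert]
              simp [hA1, Ne.symm (hne_i e' he')]
            · have hvals : (b.merged.insert (pvFind b.merged b.merged.size s0i) (pvFind b.merged b.merged.size s0j)).values = b.merged.values ++ [(pvFind b.merged b.merged.size s0j)] := by
                rw [PySem.Dict.values, PySem.Dict.items_insert_of_not_contains b.merged (pvFind b.merged b.merged.size s0j) hrootSI,
                  List.map_append]
                rfl
              show e' ∉ (b.merged.insert (pvFind b.merged b.merged.size s0i) (pvFind b.merged b.merged.size s0j)).values
              rw [hvals]
              intro hm
              rcases List.mem_append.mp hm with hm | hm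
              · exact hA2 hm
              · rw [List.mem_singleton] at hm
                exact (hne_j e' he') hm.symm
          · -- persistence zero
            have hA : stepA edge_list dP ascending a e =
                ⟨(a.s2v.erase (pvFind b.merged b.merged.size s0i)).insert (pvFind b.merged b.merged.size s0j) (PySem.Set.union TJ SS),
                 SS.foldl (fun d vk => d.insert vk (pvFind b.merged b.merged.size s0j)) a.v2s,
                 a.skel.add e, a.bd, a.bde, a.tau⟩ := by
              simp [stepA, hcA1, hcA2, hgvi, hgvj, heq, PySem.Dict.getD_eq_get?_getD, hsw, ht,
                pvGet?_erase, Ne.symm hneIJ, hSiSet, hSjSet]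
            have hB : stepB edge_list dP ascending b e =
                ⟨b.sector, b.merged.insert (pvFind b.merged b.merged.size s0i) (pvFind b.merged b.merged.size s0j), b.skel.add e, b.bd, b.bde, b.tau⟩ := by
              simp [stepB, hcB1, hcB2, PySem.Dict.getD_eq_get?_getD, hsvi, hsvj, heq, hsw, ht]
            rw [hA, hB]
            refine ⟨hbd, hbde, htau, by rw [hskel], hc2', hc3', hc4', hWR', ?_⟩
            intro e' he'
            obtain ⟨hA1, hA2, hA3⟩ := hFtail e' he'
            refine ⟨?_, ?_, hA3⟩
            · rw [PySem.Dict.contains_insert]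
              simp [hA1, Ne.symm (hne_i e' he')]
            · have hvals : (b.merged.insert (pvFind b.merged b.merged.size s0i) (pvFind b.merged b.merged.size s0j)).values = b.merged.values ++ [(pvFind b.merged b.merged.size s0j)] := by
                rw [PySem.Dict.values, PySem.Dict.items_insert_of_not_contains b.merged (pvFind b.merged b.merged.size s0j) hrootSI,
                  List.map_append]
                rfl
              show e' ∉ (b.merged.insert (pvFind b.merged b.merged.size s0i) (pvFind b.merged b.merged.size s0j)).values
              rw [hvals]
              intro hm
              rcases List.mem_append.mp hm with hm | hm
              · exact hA2 hm
              · rw [List.mem_singleton] at hm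
                exact (hne_j e' he') hm.symm

theorem InvP_foldl (edge_list : List (Int × Int)) (dP : List Int) (ascending : Bool)
    (L : List Int) (a : StA) (b : StB) (hnd : L.Nodup) (h : InvP L a b) :
    InvP [] (L.foldl (stepA edge_list dP ascending) a) (L.foldl (stepB edge_list dP ascending) b) := by
  induction L generalizing a b with
  | nil => exact h
  | cons e L ih =>
    exact ih _ _ hnd.of_cons (InvP_step edge_list dP ascending (by simp_all) h)

-- ===== VERDICT (by name: the statement is the Claim_ definition above) =====
theorem persist_alg_spec : Claim_equal_persist_alg := by
  intro edge_list dP ascending _ _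
  unfold Spec_persist_alg persist_alg persist_alg_alt
  have hnd : (PySem.List.sorted (PySem.List.pyRange 0 (PySem.List.len edge_list) 1)
      (fun e => PySem.List.pyGetD dP e 0) (!ascending)).Nodup :=
    (PySem.List.sorted_perm _ _ _).nodup_iff.mpr (PySem.List.nodup_pyRange_one _ _)
  have h0 : InvP (PySem.List.sorted (PySem.List.pyRange 0 (PySem.List.len edge_list) 1)
      (fun e => PySem.List.pyGetD dP e 0) (!ascending))
      ⟨PySem.Dict.empty, PySem.Dict.empty, PySem.Set.empty, [], [], []⟩
      ⟨PySem.Dict.empty, PySem.Dict.empty, PySem.Set.empty, [], [], []⟩ := by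
    refine ⟨rfl, rfl, rfl, rfl, ?_, ?_, ?_, ⟨fun _ => 0, ?_⟩, ?_⟩
    · intro v; simp [PySem.Dict.get?_empty]
    · intro s S hS; rw [PySem.Dict.get?_empty] at hS; cases hS
    · intro s; simp [PySem.Dict.contains_empty, PySem.Dict.get?_empty]
    · intro k v hk; rw [PySem.Dict.get?_empty] at hk; cases hk
    · intro e _
      refine ⟨PySem.Dict.contains_empty e, ?_, ?_⟩
      · simp [PySem.Dict.values, PySem.Dict.empty]
      · intro v; simp [PySem.Dict.get?_empty]
  have hfin := InvP_foldl edge_list dP ascending _ _ _ hnd h0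
  obtain ⟨h1, h2, h3, h4, -⟩ := hfin
  simp only [h1, h2, h3, h4]
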